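-- pv_equiv track=rewrite | github.com/guille0907/Archivos_de_la_Facu | ejemplos labo de datos.py | traductor_geringoso
-- ===== SOURCE A (Python) =====
-- def traductor_geringoso(lista)->dict:
--     dicci=dict()
--     cont=0
--     palabra=""
--     for elem in lista:
--         for letra in elem:
--             if cont<2:
--                 palabra+=letra
--                 cont+=1
--             else:
--                 palabra+="pa"+letra
--                 cont=1
--         dicci[elem]=palabra+"pa"
--         palabra=""
--         cont=0
--     return dicci
-- ===== SOURCE B (Python) =====
-- def traductor_geringoso(lista) -> dict:
--     def chunks(w):
--         return [w[:2]] + chunks(w[2:]) if w else []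
--     return {elem: 'pa'.join(chunks(elem)) + 'pa' for elem in lista}
-- ===== Notes on version B (the rewrite author's own statement) =====
-- stated objective: simpler
-- what changed: Replaces A's per-character loop with an explicit counter and string accumulator by a dict comprehension that recursively splits each word into 2-character chunks and joins them with 'pa' (plus the trailing 'pa').
import Mathlib
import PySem

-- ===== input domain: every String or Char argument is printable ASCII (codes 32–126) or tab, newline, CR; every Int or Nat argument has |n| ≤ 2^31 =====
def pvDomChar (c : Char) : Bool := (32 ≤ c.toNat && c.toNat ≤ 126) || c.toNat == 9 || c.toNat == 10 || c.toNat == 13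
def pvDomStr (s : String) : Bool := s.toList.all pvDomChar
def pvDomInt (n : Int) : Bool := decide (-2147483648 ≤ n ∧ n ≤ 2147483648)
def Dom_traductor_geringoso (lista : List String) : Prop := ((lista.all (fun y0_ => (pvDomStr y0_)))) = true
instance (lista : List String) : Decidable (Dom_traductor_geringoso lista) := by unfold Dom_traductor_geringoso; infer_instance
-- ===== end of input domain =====

-- B replaces A's per-character counter accumulation by chunking each word into 2-char
-- slices and joining the chunks with "pa" (objective: simpler; same O(total length) cost).
-- Python str values are carried as List Char inside the loops (exact on code points) and
-- packed with String.ofList for the dict values.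

-- ===== PORT A =====
-- the inner 'for letra in elem' loop: state (cont, palabra)
def tgStepA (st : Int × List Char) (letra : Char) : Int × List Char :=
  if st.1 < 2 then (st.1 + 1, st.2 ++ [letra])
  else (1, st.2 ++ ['p', 'a'] ++ [letra])

def traductor_geringoso (lista : List String) : List (String × String) :=
  (lista.foldl
    (fun (dicci : PySem.Dict String String) elem =>
      let st := elem.toList.foldl tgStepA ((0 : Int), ([] : List Char))
      dicci.insert elem (String.ofList (st.2 ++ ['p', 'a'])))
    PySem.Dict.empty).items

-- ===== PORT B =====
-- chunks w = [w[:2]] + chunks(w[2:]) if w else []  (w[:2] = take 2, w[2:] = drop 2: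
-- PySem.Chars.slice_to_natCast / slice_from_natCast, nonnegative bounds are exact)
def tgChunks (w : List Char) : List (List Char) :=
  if w = [] then [] else w.take 2 :: tgChunks (w.drop 2)
termination_by w.length
decreasing_by
  simp only [List.length_drop]
  cases w with
  | nil => simp_all
  | cons c cs => simp

def traductor_geringoso_alt (lista : List String) : List (String × String) :=
  (lista.foldl
    (fun (d : PySem.Dict String String) elem =>
      d.insert elem (String.ofList (PySem.Chars.join ['p', 'a'] (tgChunks elem.toList) ++ ['p', 'a'])))
    PySem.Dict.empty).items

-- ===== PRECONDITION & SPEC =====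
def Spec_traductor_geringoso (lista : List String) (out : List (String × String)) : Prop := out = traductor_geringoso_alt lista
instance (lista : List String) (out : List (String × String)) : Decidable (Spec_traductor_geringoso lista out) := by unfold Spec_traductor_geringoso; infer_instance

-- ===== CLAIM (what is proved, stated in full; the proofs are below) =====
def Claim_equal_traductor_geringoso : Prop := ∀ (lista : List String), Dom_traductor_geringoso lista → Spec_traductor_geringoso lista (traductor_geringoso lista)

-- ===== LEMMAS AND PROOFS =====

-- the tail A's inner loop produces after the first character: alternating states cont=1 (b=false) / cont=2 (b=true)
def tgTail (b : Bool) : List Char → List Char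
  | [] => []
  | c :: rest => if b then 'p' :: 'a' :: c :: tgTail false rest else c :: tgTail true rest

lemma tgFoldA_state (cs : List Char) (b : Bool) (p : List Char) :
    (cs.foldl tgStepA ((if b then 2 else 1 : Int), p)).2 = p ++ tgTail b cs := by
  induction cs generalizing b p with
  | nil => simp [tgTail]
  | cons c rest ih =>
    cases b with
    | false =>
      have h := ih true (p ++ [c])
      simp only [List.foldl_cons, tgStepA, tgTail] at *
      norm_num
      simpa using h
    | true =>
      have h := ih false (p ++ ['p', 'a'] ++ [c])
      simp only [List.foldl_cons, tgStepA, tgTail] at *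
      norm_num
      simpa using h

lemma tgFoldA_eq (cs : List Char) :
    (cs.foldl tgStepA ((0 : Int), ([] : List Char))).2 =
      match cs with
      | [] => []
      | c :: rest => c :: tgTail false rest := by
  cases cs with
  | nil => simp
  | cons c rest =>
    have h := tgFoldA_state rest false [c]
    simp only [List.foldl_cons, tgStepA] at *
    norm_num
    simpa using h

lemma tgChunks_nil : tgChunks [] = [] := by unfold tgChunks; simp

lemma tgChunks_ne (w : List Char) (h : w ≠ []) :
    tgChunks w = w.take 2 :: tgChunks (w.drop 2) := by
  conv_lhs => rw [tgChunks.eq_def]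
  simp [h]

lemma tgJoin_chunks_eq (cs : List Char) :
    PySem.Chars.join ['p', 'a'] (tgChunks cs) =
      match cs with
      | [] => []
      | c :: rest => c :: tgTail false rest := by
  induction hn : cs.length using Nat.strong_induction_on generalizing cs with
  | _ n ih =>
    match cs with
    | [] => rw [tgChunks_nil]; simp [PySem.Chars.join_nil]
    | [c] =>
      rw [tgChunks_ne _ (by simp)]
      simp [tgChunks_nil, PySem.Chars.join_singleton, tgTail]
    | c :: d :: rest =>
      rw [tgChunks_ne _ (by simp)]
      simp only [List.take_succ_cons, List.take_zero, List.drop_succ_cons, List.drop_zero]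
      have hr := ih rest.length (by subst hn; simp only [List.length_cons]; omega) rest rfl
      cases rest with
      | nil =>
        simp [tgChunks_nil, PySem.Chars.join_singleton, tgTail]
      | cons r rs =>
        rw [tgChunks_ne _ (by simp)] at hr ⊢
        rw [PySem.Chars.join_cons_cons, hr]
        simp [tgTail]

lemma tgValue_eq (cs : List Char) :
    (cs.foldl tgStepA ((0 : Int), ([] : List Char))).2 =
      PySem.Chars.join ['p', 'a'] (tgChunks cs) := by
  rw [tgFoldA_eq, tgJoin_chunks_eq]

-- ===== VERDICT (by name: the statement is the Claim_ definition above) =====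
theorem traductor_geringoso_spec : Claim_equal_traductor_geringoso := by
  intro lista _
  unfold Spec_traductor_geringoso traductor_geringoso traductor_geringoso_alt
  congr 1
  apply List.foldl_ext
  intro elem _ d
  simp only [tgValue_eq]
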